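-- pv_equiv track=rewrite | github.com/CADacombs/rhinopython | spb_NurbsSrf_Drape.py | _getBorderPointIndices
-- ===== SOURCE A (Python) =====
-- def _get_orthogonal_neighbor_count_of_point(pts, iU, iV):
--     """
--     Parameters:
--         pts: u list of v lists of pts
--         iU: int Index in u (top-level list)
--         iV: int Index of v (nested list)
--     Returns:
--         int (0, 1, 2, 3, or 4)
--     """
--
--     idx_MaxU = len(pts)-1
--     idx_MaxV = len(pts[0])-1
--
--     ct = 0
--
--     if iU-1 >= 0 and pts[iU-1][iV] is not None:
--         ct += 1
--     if iU+1 <= idx_MaxU and pts[iU+1][iV] is not None: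
--         ct += 1
--     if iV-1 >= 0 and pts[iU][iV-1] is not None:
--         ct += 1
--     if iV+1 <= idx_MaxV and pts[iU][iV+1] is not None:
--         ct += 1
--
--     return ct
--
-- def _getBorderPointIndices(pts_Target):
--     idxs_borderPts = []
--     for iU in range(len(pts_Target)):
--         for iV in range(len(pts_Target[0])):
--             if (
--                 pts_Target[iU][iV] is None and
--                 _get_orthogonal_neighbor_count_of_point(pts_Target, iU, iV) > 0
--             ):
--                 idxs_borderPts.append((iU,iV))
--     return idxs_borderPts
-- ===== SOURCE B (Python) =====
-- def _getBorderPointIndices(pts_Target):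
--     # Scatter: each non-None point marks its in-bounds None neighbors; sort at the end.
--     if not pts_Target:
--         return []
--     nU = len(pts_Target)
--     nV = len(pts_Target[0])
--     border = set()
--     for iU in range(nU):
--         for iV in range(nV):
--             if pts_Target[iU][iV] is not None:
--                 for (u, v) in ((iU - 1, iV), (iU + 1, iV), (iU, iV - 1), (iU, iV + 1)):
--                     if 0 <= u < nU and 0 <= v < nV and pts_Target[u][v] is None:
--                         border.add((u, v))
--     return sorted(border)
-- ===== Notes on version B (the rewrite author's own statement) =====
-- stated objective: alternative
-- what changed: B inverts A's gather (for every cell, count its non-None neighbors) into a scatter (every non-None point marks its in-bounds None neighbors into a set), then returns the set sorted, instead of A's row-major scan with a per-cell neighbor-counting helper.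
import Mathlib
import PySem

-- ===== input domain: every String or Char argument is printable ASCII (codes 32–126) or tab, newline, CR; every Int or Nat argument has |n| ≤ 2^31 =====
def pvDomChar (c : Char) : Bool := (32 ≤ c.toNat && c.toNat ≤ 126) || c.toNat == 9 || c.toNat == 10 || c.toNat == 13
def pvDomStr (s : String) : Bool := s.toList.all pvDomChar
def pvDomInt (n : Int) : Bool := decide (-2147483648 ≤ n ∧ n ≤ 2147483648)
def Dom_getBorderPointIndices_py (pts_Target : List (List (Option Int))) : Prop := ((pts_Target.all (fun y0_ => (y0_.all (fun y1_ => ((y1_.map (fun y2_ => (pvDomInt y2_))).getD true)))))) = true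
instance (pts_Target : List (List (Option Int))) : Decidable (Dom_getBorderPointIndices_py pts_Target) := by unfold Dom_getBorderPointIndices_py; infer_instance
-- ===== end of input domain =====

-- B replaces A's gather (per-cell neighbor count) by a scatter (each non-None point marks its
-- in-bounds None neighbors into a set, sorted at the end): an alternative decomposition, same cost class.

-- ===== PORT A =====
-- _get_orthogonal_neighbor_count_of_point, literally (guarded indexing via pyGetD; Pre_ keeps every access in range)
def pvNbCount (pts : List (List (Option Int))) (iU iV : Int) : Int :=
  let idx_MaxU : Int := (pts.length : Int) - 1
  let idx_MaxV : Int := ((PySem.List.pyGetD pts 0 []).length : Int) - 1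
  let ct : Int := 0
  let ct := if 0 ≤ iU - 1 ∧ PySem.List.pyGetD (PySem.List.pyGetD pts (iU - 1) []) iV none ≠ none then ct + 1 else ct
  let ct := if iU + 1 ≤ idx_MaxU ∧ PySem.List.pyGetD (PySem.List.pyGetD pts (iU + 1) []) iV none ≠ none then ct + 1 else ct
  let ct := if 0 ≤ iV - 1 ∧ PySem.List.pyGetD (PySem.List.pyGetD pts iU []) (iV - 1) none ≠ none then ct + 1 else ct
  let ct := if iV + 1 ≤ idx_MaxV ∧ PySem.List.pyGetD (PySem.List.pyGetD pts iU []) (iV + 1) none ≠ none then ct + 1 else ct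
  ct

def getBorderPointIndices_py (pts_Target : List (List (Option Int))) : List (Int × Int) :=
  (PySem.List.pyRange 0 (pts_Target.length : Int) 1).foldl (fun acc iU =>
    (PySem.List.pyRange 0 ((PySem.List.pyGetD pts_Target 0 []).length : Int) 1).foldl (fun acc iV =>
      if PySem.List.pyGetD (PySem.List.pyGetD pts_Target iU []) iV none = none ∧
          0 < pvNbCount pts_Target iU iV
      then acc ++ [(iU, iV)] else acc) acc) []

-- ===== PORT B =====
def getBorderPointIndices_py_alt (pts_Target : List (List (Option Int))) : List (Int × Int) :=
  if pts_Target = [] then []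
  else
    let nU : Int := (pts_Target.length : Int)
    let nV : Int := ((PySem.List.pyGetD pts_Target 0 []).length : Int)
    let border : PySem.Set (Int × Int) :=
      (PySem.List.pyRange 0 nU 1).foldl (fun s iU =>
        (PySem.List.pyRange 0 nV 1).foldl (fun s iV =>
          if PySem.List.pyGetD (PySem.List.pyGetD pts_Target iU []) iV none ≠ none then
            [(iU - 1, iV), (iU + 1, iV), (iU, iV - 1), (iU, iV + 1)].foldl (fun s uv =>
              if 0 ≤ uv.1 ∧ uv.1 < nU ∧ 0 ≤ uv.2 ∧ uv.2 < nV ∧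
                  PySem.List.pyGetD (PySem.List.pyGetD pts_Target uv.1 []) uv.2 none = none
              then PySem.Set.add s uv else s) s
          else s) s) PySem.Set.empty
    PySem.List.sorted2 border Prod.fst Prod.snd

-- ===== PRECONDITION & SPEC =====
-- Pre_ excludes exactly the ragged grids on which Python A raises IndexError: a row shorter than row 0
-- (A indexes every row at all columns of row 0).
def Pre_getBorderPointIndices_py (pts_Target : List (List (Option Int))) : Prop :=
  ∀ r ∈ pts_Target, (pts_Target.headD []).length ≤ r.length
instance (pts_Target : List (List (Option Int))) : Decidable (Pre_getBorderPointIndices_py pts_Target) := by unfold Pre_getBorderPointIndices_py; infer_instance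
def pvWitness_getBorderPointIndices_py : List (List (Option Int)) := [[some 1, none], [none, none]]
def Spec_getBorderPointIndices_py (pts_Target : List (List (Option Int))) (out : List (Int × Int)) : Prop := out = getBorderPointIndices_py_alt pts_Target
instance (pts_Target : List (List (Option Int))) (out : List (Int × Int)) : Decidable (Spec_getBorderPointIndices_py pts_Target out) := by unfold Spec_getBorderPointIndices_py; infer_instance

-- ===== CLAIM (what is proved, stated in full; the proofs are below) =====
def Claim_equal_getBorderPointIndices_py : Prop := ∀ (pts_Target : List (List (Option Int))), Dom_getBorderPointIndices_py pts_Target → Pre_getBorderPointIndices_py pts_Target → Spec_getBorderPointIndices_py pts_Target (getBorderPointIndices_py pts_Target)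

-- ===== LEMMAS AND PROOFS =====

-- cell lookup shared by both characterizations
def pvCell (pts : List (List (Option Int))) (u v : Int) : Option Int :=
  PySem.List.pyGetD (PySem.List.pyGetD pts u []) v none

-- A's per-cell test, written with A's exact guard expressions
abbrev pvACond (pts : List (List (Option Int))) (u v : Int) : Prop :=
  pvCell pts u v = none ∧ 0 < pvNbCount pts u v

def pvHasNb (pts : List (List (Option Int))) (u v : Int) : Prop :=
  (0 ≤ u - 1 ∧ pvCell pts (u - 1) v ≠ none) ∨
  (u + 1 ≤ (pts.length : Int) - 1 ∧ pvCell pts (u + 1) v ≠ none) ∨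
  (0 ≤ v - 1 ∧ pvCell pts u (v - 1) ≠ none) ∨
  (v + 1 ≤ ((PySem.List.pyGetD pts 0 []).length : Int) - 1 ∧ pvCell pts u (v + 1) ≠ none)

lemma pv_chain_pos (c1 c2 c3 c4 : Prop) [Decidable c1] [Decidable c2] [Decidable c3] [Decidable c4] :
    (0 <
      (let t1 : Int := if c1 then 0 + 1 else 0
       let t2 : Int := if c2 then t1 + 1 else t1
       let t3 : Int := if c3 then t2 + 1 else t2
       if c4 then t3 + 1 else t3)) ↔ (c1 ∨ c2 ∨ c3 ∨ c4) := by
  by_cases h1 : c1 <;> by_cases h2 : c2 <;> by_cases h3 : c3 <;> by_cases h4 : c4 <;>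
    simp [h1, h2, h3, h4]

lemma pv_nbCount_pos (pts : List (List (Option Int))) (u v : Int) :
    0 < pvNbCount pts u v ↔ pvHasNb pts u v := by
  unfold pvNbCount pvHasNb pvCell
  exact pv_chain_pos _ _ _ _

-- lexicographic (Python tuple) order on Int pairs
def pvLexLt (a b : Int × Int) : Prop := a.1 < b.1 ∨ (a.1 = b.1 ∧ a.2 < b.2)
def pvLe (a b : Int × Int) : Prop := ¬ pvLexLt b a
def pvLtb (a b : Int × Int) : Bool :=
  decide (a.1 < b.1) || (!decide (b.1 < a.1) && decide (a.2 < b.2))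

lemma pvLtb_iff (a b : Int × Int) : pvLtb a b = true ↔ pvLexLt a b := by
  simp [pvLtb, pvLexLt]; omega

lemma pvLe_antisymm {a b : Int × Int} (h1 : pvLe a b) (h2 : pvLe b a) : a = b := by
  obtain ⟨a1, a2⟩ := a; obtain ⟨b1, b2⟩ := b
  simp [pvLe, pvLexLt] at h1 h2
  have : a1 = b1 ∧ a2 = b2 := by omega
  simp [this.1, this.2]

lemma pvLe_of_lt {a b : Int × Int} (h : pvLexLt a b) : pvLe a b := by
  obtain ⟨a1, a2⟩ := a; obtain ⟨b1, b2⟩ := b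
  simp [pvLe, pvLexLt] at *; omega

lemma pvLt_le_trans {a b c : Int × Int} (h1 : pvLexLt a b) (h2 : pvLe b c) : pvLe a c := by
  obtain ⟨a1, a2⟩ := a; obtain ⟨b1, b2⟩ := b; obtain ⟨c1, c2⟩ := c
  simp [pvLe, pvLexLt] at *; omega

-- insertion (PySem's insertBy with the lex comparison) preserves sortedness
lemma pv_insertBy_pairwise (x : Int × Int) :
    ∀ acc : List (Int × Int), acc.Pairwise pvLe →
      (PySem.List.insertBy pvLtb x acc).Pairwise pvLe := by
  intro acc
  induction acc with
  | nil => intro _; simp [PySem.List.insertBy]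
  | cons y ys ih =>
    intro hp
    rw [List.pairwise_cons] at hp
    by_cases h : pvLtb x y = true
    · rw [show PySem.List.insertBy pvLtb x (y :: ys) = x :: y :: ys by
        simp [PySem.List.insertBy, h]]
      have hxy : pvLexLt x y := (pvLtb_iff x y).mp h
      constructor
      · intro z hz
        rcases List.mem_cons.mp hz with rfl | hz
        · exact pvLe_of_lt hxy
        · exact pvLt_le_trans hxy (hp.1 z hz)
      · exact List.pairwise_cons.mpr hp
    · rw [show PySem.List.insertBy pvLtb x (y :: ys) = y :: PySem.List.insertBy pvLtb x ys by
        simp [PySem.List.insertBy, h]]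
      constructor
      · intro z hz
        rcases (PySem.List.mem_insertBy _ _ _ _).mp hz with rfl | hz
        · simpa [pvLe] using fun hc => h ((pvLtb_iff z y).mpr hc)
        · exact hp.1 z hz
      · exact ih hp.2

lemma pv_sorted2_eq_foldl (xs : List (Int × Int)) :
    PySem.List.sorted2 xs Prod.fst Prod.snd false =
      xs.foldl (fun acc x => PySem.List.insertBy pvLtb x acc) [] := rfl

lemma pv_sorted2_pairwise (xs : List (Int × Int)) :
    (PySem.List.sorted2 xs Prod.fst Prod.snd false).Pairwise pvLe := by
  rw [pv_sorted2_eq_foldl]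
  suffices h : ∀ (l acc : List (Int × Int)), acc.Pairwise pvLe →
      (l.foldl (fun acc x => PySem.List.insertBy pvLtb x acc) acc).Pairwise pvLe by
    exact h xs [] (by simp)
  intro l
  induction l with
  | nil => intro acc h; simpa using h
  | cons x t ih => intro acc h; exact ih _ (pv_insertBy_pairwise x acc h)

-- generic fold shapes for B's nested scatter loops
lemma pv_mem_foldl_or {α β : Type} (f : List α → β → List α) (g : β → α → Prop)
    (h : ∀ s b y, y ∈ f s b ↔ y ∈ s ∨ g b y) :
    ∀ (l : List β) (s : List α) (y : α), y ∈ l.foldl f s ↔ y ∈ s ∨ ∃ b ∈ l, g b y := by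
  intro l
  induction l with
  | nil => simp
  | cons b t ih =>
    intro s y
    simp only [List.foldl_cons, ih, h]
    constructor
    · rintro ((hs | hg) | ⟨c, hc, hgc⟩)
      · exact Or.inl hs
      · exact Or.inr ⟨b, by simp, hg⟩
      · exact Or.inr ⟨c, by simp [hc], hgc⟩
    · rintro (hs | ⟨c, hc, hgc⟩)
      · exact Or.inl (Or.inl hs)
      · rcases List.mem_cons.mp hc with rfl | hc
        · exact Or.inl (Or.inr hgc)
        · exact Or.inr ⟨c, hc, hgc⟩

lemma pv_nodup_foldl {α β : Type} (f : List α → β → List α)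
    (h : ∀ s b, s.Nodup → (f s b).Nodup) :
    ∀ (l : List β) (s : List α), s.Nodup → (l.foldl f s).Nodup := by
  intro l
  induction l with
  | nil => intro s hs; simpa using hs
  | cons b t ih => intro s hs; exact ih _ (h s b hs)

-- A's scan as a filtered row-major list
def pvAList (pts : List (List (Option Int))) : List (Int × Int) :=
  (PySem.List.pyRange 0 (pts.length : Int) 1).flatMap (fun iU =>
    ((PySem.List.pyRange 0 ((PySem.List.pyGetD pts 0 []).length : Int) 1).filter
      (fun iV => decide (pvACond pts iU iV))).map (fun iV => (iU, iV)))

lemma pv_A_eq (pts : List (List (Option Int))) : getBorderPointIndices_py pts = pvAList pts := by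
  unfold getBorderPointIndices_py pvAList pvACond pvCell
  simp only [PySem.List.foldl_append_ite, PySem.List.foldl_append_eq_flatMap, List.nil_append]

lemma pv_mem_AList (pts : List (List (Option Int))) (y : Int × Int) :
    y ∈ pvAList pts ↔
      0 ≤ y.1 ∧ y.1 < (pts.length : Int) ∧ 0 ≤ y.2 ∧
        y.2 < ((PySem.List.pyGetD pts 0 []).length : Int) ∧ pvACond pts y.1 y.2 := by
  obtain ⟨u, v⟩ := y
  simp only [pvAList, List.mem_flatMap, List.mem_map, List.mem_filter,
    PySem.List.mem_pyRange_one, decide_eq_true_eq, Prod.mk.injEq]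
  constructor
  · rintro ⟨iU, hU, iV, ⟨hV, hc⟩, rfl, rfl⟩
    exact ⟨hU.1, hU.2, hV.1, hV.2, hc⟩
  · rintro ⟨h1, h2, h3, h4, hc⟩
    exact ⟨u, ⟨h1, h2⟩, v, ⟨⟨h3, h4⟩, hc⟩, rfl, rfl⟩

lemma pvLexLt_ne {a b : Int × Int} (h : pvLexLt a b) : a ≠ b := by
  obtain ⟨a1, a2⟩ := a; obtain ⟨b1, b2⟩ := b
  simp [pvLexLt] at *; omega

lemma pv_AList_pairwise (pts : List (List (Option Int))) : (pvAList pts).Pairwise pvLexLt := by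
  unfold pvAList
  rw [List.pairwise_flatMap]
  constructor
  · intro a _
    exact ((PySem.List.pairwise_lt_pyRange_one 0 _).filter _).map _
      (fun x y h => Or.inr ⟨rfl, h⟩)
  · refine (PySem.List.pairwise_lt_pyRange_one 0 _).imp_of_mem ?_
    intro a b _ _ hab x hx y hy
    simp only [List.mem_map, List.mem_filter] at hx hy
    obtain ⟨_, _, rfl⟩ := hx
    obtain ⟨_, _, rfl⟩ := hy
    exact Or.inl hab

-- B's scatter accumulator (exactly the fold in port B, with nU/nV inlined)
def pvBorder (pts : List (List (Option Int))) : List (Int × Int) :=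
  (PySem.List.pyRange 0 (pts.length : Int) 1).foldl (fun s iU =>
    (PySem.List.pyRange 0 ((PySem.List.pyGetD pts 0 []).length : Int) 1).foldl (fun s iV =>
      if PySem.List.pyGetD (PySem.List.pyGetD pts iU []) iV none ≠ none then
        [(iU - 1, iV), (iU + 1, iV), (iU, iV - 1), (iU, iV + 1)].foldl (fun s uv =>
          if 0 ≤ uv.1 ∧ uv.1 < (pts.length : Int) ∧ 0 ≤ uv.2 ∧
              uv.2 < ((PySem.List.pyGetD pts 0 []).length : Int) ∧
              PySem.List.pyGetD (PySem.List.pyGetD pts uv.1 []) uv.2 none = none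
          then PySem.Set.add s uv else s) s
      else s) s) PySem.Set.empty

lemma pv_B_eq (pts : List (List (Option Int))) (h : ¬ pts = []) :
    getBorderPointIndices_py_alt pts =
      PySem.List.sorted2 (pvBorder pts) Prod.fst Prod.snd := by
  simp only [getBorderPointIndices_py_alt, if_neg h, pvBorder]

-- the target cell condition of B's innermost test
abbrev pvBC (pts : List (List (Option Int))) (uv : Int × Int) : Prop :=
  0 ≤ uv.1 ∧ uv.1 < (pts.length : Int) ∧ 0 ≤ uv.2 ∧
    uv.2 < ((PySem.List.pyGetD pts 0 []).length : Int) ∧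
    PySem.List.pyGetD (PySem.List.pyGetD pts uv.1 []) uv.2 none = none

lemma pv_mem_border (pts : List (List (Option Int))) (y : Int × Int) :
    y ∈ pvBorder pts ↔
      ∃ u ∈ PySem.List.pyRange 0 (pts.length : Int) 1,
        ∃ v ∈ PySem.List.pyRange 0 ((PySem.List.pyGetD pts 0 []).length : Int) 1,
          pvCell pts u v ≠ none ∧
            ∃ b ∈ [(u - 1, v), (u + 1, v), (u, v - 1), (u, v + 1)], pvBC pts b ∧ y = b := by
  have h3 : ∀ (s : List (Int × Int)) (uv : Int × Int) (z : Int × Int),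
      z ∈ (if pvBC pts uv then PySem.Set.add s uv else s) ↔ z ∈ s ∨ (pvBC pts uv ∧ z = uv) := by
    intro s uv z
    split_ifs with hc
    · rw [PySem.Set.mem_add]; tauto
    · tauto
  have h2 : ∀ (s : List (Int × Int)) (iV : Int) (z : Int × Int) (iU : Int),
      z ∈ (if PySem.List.pyGetD (PySem.List.pyGetD pts iU []) iV none ≠ none then
            [(iU - 1, iV), (iU + 1, iV), (iU, iV - 1), (iU, iV + 1)].foldl
              (fun s uv => if pvBC pts uv then PySem.Set.add s uv else s) s
          else s) ↔
        z ∈ s ∨ (pvCell pts iU iV ≠ none ∧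
          ∃ b ∈ [(iU - 1, iV), (iU + 1, iV), (iU, iV - 1), (iU, iV + 1)], pvBC pts b ∧ z = b) := by
    intro s iV z iU
    split_ifs with hc
    · rw [pv_mem_foldl_or _ _ h3]
      unfold pvCell
      tauto
    · unfold pvCell at hc
      tauto
  have h1 : ∀ (s : List (Int × Int)) (iU : Int) (z : Int × Int),
      z ∈ ((PySem.List.pyRange 0 ((PySem.List.pyGetD pts 0 []).length : Int) 1).foldl
            (fun s iV =>
              if PySem.List.pyGetD (PySem.List.pyGetD pts iU []) iV none ≠ none then
                [(iU - 1, iV), (iU + 1, iV), (iU, iV - 1), (iU, iV + 1)].foldl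
                  (fun s uv => if pvBC pts uv then PySem.Set.add s uv else s) s
              else s) s) ↔
        z ∈ s ∨ ∃ v ∈ PySem.List.pyRange 0 ((PySem.List.pyGetD pts 0 []).length : Int) 1,
          pvCell pts iU v ≠ none ∧
            ∃ b ∈ [(iU - 1, v), (iU + 1, v), (iU, v - 1), (iU, v + 1)], pvBC pts b ∧ z = b := by
    intro s iU z
    exact pv_mem_foldl_or _ _ (fun s iV z => h2 s iV z iU) _ s z
  unfold pvBorder pvBC
  rw [pv_mem_foldl_or _ _ h1]
  simp [pvBC]

lemma pv_border_nodup (pts : List (List (Option Int))) : (pvBorder pts).Nodup := by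
  unfold pvBorder
  apply pv_nodup_foldl
  · intro s iU hs
    apply pv_nodup_foldl
    · intro s' iV hs'
      split_ifs with hc
      · apply pv_nodup_foldl
        · intro s'' uv hs''
          split_ifs with hb
          · exact PySem.Set.nodup_add _ _ hs''
          · exact hs''
        · exact hs'
      · exact hs'
    · exact hs
  · exact List.nodup_nil

-- the combinatorial core: scatter reaches y iff A's gather test holds at y
lemma pv_scatter_iff_gather (pts : List (List (Option Int))) (y : Int × Int) :
    (∃ u ∈ PySem.List.pyRange 0 (pts.length : Int) 1,
        ∃ v ∈ PySem.List.pyRange 0 ((PySem.List.pyGetD pts 0 []).length : Int) 1,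
          pvCell pts u v ≠ none ∧
            ∃ b ∈ [(u - 1, v), (u + 1, v), (u, v - 1), (u, v + 1)], pvBC pts b ∧ y = b) ↔
      (0 ≤ y.1 ∧ y.1 < (pts.length : Int) ∧ 0 ≤ y.2 ∧
        y.2 < ((PySem.List.pyGetD pts 0 []).length : Int) ∧ pvACond pts y.1 y.2) := by
  simp only [PySem.List.mem_pyRange_one, List.mem_cons, List.not_mem_nil, or_false]
  constructor
  · rintro ⟨u, ⟨hu1, hu2⟩, v, ⟨hv1, hv2⟩, hne, b, hb, hC, rfl⟩
    obtain ⟨hb1, hb2, hb3, hb4, hbnone⟩ := hC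
    refine ⟨hb1, hb2, hb3, hb4, hbnone, ?_⟩
    rw [pv_nbCount_pos]
    unfold pvHasNb
    rcases hb with heq | heq | heq | heq <;> rw [heq] <;> dsimp only
    · -- y = (u - 1, v): the scatterer (u, v) is its down-neighbor
      right; left
      exact ⟨by omega, by rw [show u - 1 + 1 = u by omega]; exact hne⟩
    · -- y = (u + 1, v): the scatterer (u, v) is its up-neighbor
      left
      exact ⟨by omega, by rw [show u + 1 - 1 = u by omega]; exact hne⟩
    · -- y = (u, v - 1): the scatterer (u, v) is its right-neighbor
      right; right; right
      exact ⟨by omega, by rw [show v - 1 + 1 = v by omega]; exact hne⟩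
    · -- y = (u, v + 1): the scatterer (u, v) is its left-neighbor
      right; right; left
      exact ⟨by omega, by rw [show v + 1 - 1 = v by omega]; exact hne⟩
  · rintro ⟨h1, h2, h3, h4, hnone, hcnt⟩
    rw [pv_nbCount_pos] at hcnt
    unfold pvHasNb at hcnt
    rcases hcnt with ⟨hg, hne⟩ | ⟨hg, hne⟩ | ⟨hg, hne⟩ | ⟨hg, hne⟩
    · -- non-None neighbor above y: it scatters onto y as its down-neighbor
      refine ⟨y.1 - 1, ⟨by omega, by omega⟩, y.2, ⟨h3, h4⟩, hne, y, ?_,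
        ⟨h1, h2, h3, h4, hnone⟩, rfl⟩
      right; left
      rw [show y.1 - 1 + 1 = y.1 by omega]
    · refine ⟨y.1 + 1, ⟨by omega, by omega⟩, y.2, ⟨h3, h4⟩, hne, y, ?_,
        ⟨h1, h2, h3, h4, hnone⟩, rfl⟩
      left
      rw [show y.1 + 1 - 1 = y.1 by omega]
    · refine ⟨y.1, ⟨by omega, by omega⟩, y.2 - 1, ⟨by omega, by omega⟩, hne, y, ?_,
        ⟨h1, h2, h3, h4, hnone⟩, rfl⟩
      right; right; right
      rw [show y.2 - 1 + 1 = y.2 by omega]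
    · refine ⟨y.1, ⟨by omega, by omega⟩, y.2 + 1, ⟨by omega, by omega⟩, hne, y, ?_,
        ⟨h1, h2, h3, h4, hnone⟩, rfl⟩
      right; right; left
      rw [show y.2 + 1 - 1 = y.2 by omega]

lemma pv_main (pts : List (List (Option Int))) :
    getBorderPointIndices_py pts = getBorderPointIndices_py_alt pts := by
  by_cases hE : pts = []
  · subst hE; decide
  · rw [pv_A_eq, pv_B_eq pts hE]
    have hperm : (pvAList pts).Perm (PySem.List.sorted2 (pvBorder pts) Prod.fst Prod.snd) := by
      refine List.Perm.trans ?_ (PySem.List.sorted2_perm (pvBorder pts) Prod.fst Prod.snd false).symm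
      refine (List.perm_ext_iff_of_nodup ?_ (pv_border_nodup pts)).mpr ?_
      · exact (pv_AList_pairwise pts).imp (fun h => pvLexLt_ne h)
      · intro y
        rw [pv_mem_AList, pv_mem_border]
        exact (pv_scatter_iff_gather pts y).symm
    exact List.Perm.eq_of_pairwise
      (fun a b _ _ h1 h2 => pvLe_antisymm h1 h2)
      ((pv_AList_pairwise pts).imp (fun h => pvLe_of_lt h))
      (pv_sorted2_pairwise (pvBorder pts))
      hperm

-- ===== VERDICT (by name: the statement is the Claim_ definition above) =====
theorem getBorderPointIndices_py_spec : Claim_equal_getBorderPointIndices_py := by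
  intro pts _ _
  unfold Spec_getBorderPointIndices_py
  exact pv_main pts
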